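-- pv_equiv track=rewrite | github.com/wawzysys/Algorithm | 2024bishi/1_2024秋招/20250811拼多多/2.py | solve
-- ===== SOURCE A (Python) =====
-- import heapq
--
-- def solve(n, times):
--     min_heap = []
--     cur = 0
--     tol = 0
--     for ti, wi in times:
--         if cur < ti:
--             cur = ti
--         heapq.heappush(min_heap, (wi, ti))
--         while min_heap and cur >= min_heap[0][1]:
--             a, b = heapq.heappop(min_heap)
--             cur += a
--             tol += (cur - b)
--     while min_heap:
--         a, b = heapq.heappop(min_heap)
--         cur += a
--         tol += (cur - b)
--     return tol
-- ===== SOURCE B (Python) =====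
-- def solve(n, times):
--     pending = []
--     cur = 0
--     tol = 0
--     for ti, wi in times:
--         if cur < ti:
--             cur = ti
--         pending.append((wi, ti))
--         while pending:
--             m = min(pending)
--             if cur < m[1]:
--                 break
--             pending.remove(m)
--             cur += m[0]
--             tol += cur - m[1]
--     while pending:
--         m = min(pending)
--         pending.remove(m)
--         cur += m[0]
--         tol += cur - m[1]
--     return tol
-- ===== Notes on version B (the rewrite author's own statement) =====
-- stated objective: simpler
-- what changed: Replaces the heapq min-heap with a plain list: each pop scans for min(pending) under full tuple order and list.remove()s it, so no heap structure or heapq module is needed.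
import Mathlib
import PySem

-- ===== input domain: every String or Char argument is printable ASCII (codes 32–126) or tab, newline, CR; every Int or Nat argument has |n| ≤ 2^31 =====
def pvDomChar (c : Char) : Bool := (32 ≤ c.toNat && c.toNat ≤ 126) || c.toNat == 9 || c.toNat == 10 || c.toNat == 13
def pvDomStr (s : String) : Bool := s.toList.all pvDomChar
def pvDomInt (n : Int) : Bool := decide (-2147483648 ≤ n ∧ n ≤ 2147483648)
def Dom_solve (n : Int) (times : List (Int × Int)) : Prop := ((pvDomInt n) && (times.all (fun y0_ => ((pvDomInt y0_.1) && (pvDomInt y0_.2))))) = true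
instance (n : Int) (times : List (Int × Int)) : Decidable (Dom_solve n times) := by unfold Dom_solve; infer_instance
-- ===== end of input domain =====

-- B replaces A's heapq min-heap with a plain list scanned by min() and list.remove(); same outputs (objective: simpler, not faster).

-- ===== PORT A =====
-- Python tuple '<' on (Int, Int)
def tupLt (a b : Int × Int) : Bool := a.1 < b.1 || (a.1 == b.1 && a.2 < b.2)

-- heapq.heappush: port of the library call as insertion into the min-priority queue
-- (the heap is modelled by its sorted sequence; heappop = take the head)
def heappush (h : List (Int × Int)) (x : Int × Int) : List (Int × Int) :=
  PySem.List.insertBy tupLt x h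

-- inner 'while min_heap and cur >= min_heap[0][1]' loop of A
def whileA : List (Int × Int) → Int → Int → (List (Int × Int) × Int × Int)
  | [], cur, tol => ([], cur, tol)
  | (a, b) :: t, cur, tol =>
      if b ≤ cur then whileA t (cur + a) (tol + (cur + a - b))
      else ((a, b) :: t, cur, tol)

-- final 'while min_heap' drain of A
def drainA : List (Int × Int) → Int → Int → Int
  | [], _, tol => tol
  | (a, b) :: t, cur, tol => drainA t (cur + a) (tol + (cur + a - b))

def solve (n : Int) (times : List (Int × Int)) : Int :=
  let st := times.foldl
    (fun (st : List (Int × Int) × Int × Int) (p : Int × Int) =>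
      let cur := if st.2.1 < p.1 then p.1 else st.2.1
      whileA (heappush st.1 (p.2, p.1)) cur st.2.2)
    ([], 0, 0)
  drainA st.1 st.2.1 st.2.2

-- ===== PORT B =====
-- termination helper for B's while loops (cited by name in decreasing_by)
theorem remove?_length {α : Type} [BEq α] [LawfulBEq α] (xs : List α) (v : α) (r : List α)
    (h : PySem.List.remove? xs v = some r) : r.length < xs.length := by
  induction xs generalizing r with
  | nil =>
    rw [(PySem.List.remove?_eq_none_iff [] v).mpr (by simp)] at h
    exact absurd h (by simp)
  | cons x t ih =>
    by_cases hx : x = v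
    · subst hx; simp [PySem.List.remove?_cons_self] at h; simp [← h]
    · rw [PySem.List.remove?_cons_of_ne t hx] at h
      cases hr : PySem.List.remove? t v with
      | none => rw [hr] at h; simp at h
      | some r' =>
        rw [hr] at h; simp at h
        have := ih r' hr
        simp [← h]; omega

-- inner 'while pending: m = min(pending); if cur < m[1]: break; …' loop of B
def whileB (L : List (Int × Int)) (cur tol : Int) : (List (Int × Int) × Int × Int) :=
  match PySem.List.min2? L Prod.fst Prod.snd with
  | none => (L, cur, tol)
  | some m =>
      if m.2 ≤ cur then
        match hr : PySem.List.remove? L m with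
        | none => (L, cur, tol)
        | some L' => whileB L' (cur + m.1) (tol + (cur + m.1 - m.2))
      else (L, cur, tol)
  termination_by L.length
  decreasing_by exact remove?_length L m L' hr

-- final 'while pending' drain of B
def drainB (L : List (Int × Int)) (cur tol : Int) : Int :=
  match PySem.List.min2? L Prod.fst Prod.snd with
  | none => tol
  | some m =>
      match hr : PySem.List.remove? L m with
      | none => tol
      | some L' => drainB L' (cur + m.1) (tol + (cur + m.1 - m.2))
  termination_by L.length
  decreasing_by exact remove?_length L m L' hr

def solve_alt (n : Int) (times : List (Int × Int)) : Int :=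
  let st := times.foldl
    (fun (st : List (Int × Int) × Int × Int) (p : Int × Int) =>
      let cur := if st.2.1 < p.1 then p.1 else st.2.1
      whileB (st.1 ++ [(p.2, p.1)]) cur st.2.2)
    ([], 0, 0)
  drainB st.1 st.2.1 st.2.2

-- ===== PRECONDITION & SPEC =====
def Spec_solve (n : Int) (times : List (Int × Int)) (out : Int) : Prop := out = solve_alt n times
instance (n : Int) (times : List (Int × Int)) (out : Int) : Decidable (Spec_solve n times out) := by unfold Spec_solve; infer_instance

-- ===== CLAIM (what is proved, stated in full; the proofs are below) =====
def Claim_equal_solve : Prop := ∀ (n : Int) (times : List (Int × Int)), Dom_solve n times → Spec_solve n times (solve n times)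

-- ===== LEMMAS AND PROOFS =====

-- Python's tuple '<' is the lexicographic (linear) order
theorem tupLt_iff (a b : Int × Int) : tupLt a b = true ↔ toLex a < toLex b := by
  simp [tupLt, Prod.Lex.lt_iff]

-- the invariant tying A's heap (a sorted sequence) to B's pending list
def PInv (S L : List (Int × Int)) : Prop :=
  S.Pairwise (fun a b => toLex a ≤ toLex b) ∧ S.Perm L

theorem lex_le_iff (a b : Int × Int) :
    toLex a ≤ toLex b ↔ (a.1 < b.1 ∨ (a.1 = b.1 ∧ a.2 ≤ b.2)) := by
  rw [← not_lt, Prod.Lex.lt_iff]; simp only [ofLex_toLex]; omega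

theorem min2_nil : PySem.List.min2? ([] : List (Int × Int)) Prod.fst Prod.snd = none := rfl

theorem min2_singleton (x : Int × Int) :
    PySem.List.min2? [x] Prod.fst Prod.snd = some x := by
  simp [PySem.List.min2?]

theorem min2_cons_cons (x y : Int × Int) (t : List (Int × Int)) :
    PySem.List.min2? (x :: y :: t) Prod.fst Prod.snd =
    PySem.List.min2? ((if y.1 < x.1 ∨ (y.1 ≤ x.1 ∧ y.2 < x.2) then y else x) :: t)
      Prod.fst Prod.snd := by
  simp [PySem.List.min2?, apply_ite some]

theorem min2_cons_isSome (t : List (Int × Int)) : ∀ x : Int × Int,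
    ∃ r, PySem.List.min2? (x :: t) Prod.fst Prod.snd = some r := by
  induction t with
  | nil => intro x; exact ⟨x, min2_singleton x⟩
  | cons y t ih =>
    intro x
    rw [min2_cons_cons]
    exact ih _

theorem min2_spec (t : List (Int × Int)) : ∀ x r : Int × Int,
    PySem.List.min2? (x :: t) Prod.fst Prod.snd = some r →
    r ∈ x :: t ∧ ∀ y ∈ x :: t, toLex r ≤ toLex y := by
  induction t with
  | nil =>
    intro x r h
    rw [min2_singleton] at h
    cases h
    exact ⟨by simp, by simp⟩
  | cons y t ih =>
    intro x r h
    rw [min2_cons_cons] at h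
    obtain ⟨hmem, hmin⟩ := ih _ r h
    have hzx : toLex (if y.1 < x.1 ∨ (y.1 ≤ x.1 ∧ y.2 < x.2) then y else x) ≤ toLex x := by
      by_cases hc : y.1 < x.1 ∨ (y.1 ≤ x.1 ∧ y.2 < x.2)
      · rw [if_pos hc, lex_le_iff]; omega
      · rw [if_neg hc]
    have hzy : toLex (if y.1 < x.1 ∨ (y.1 ≤ x.1 ∧ y.2 < x.2) then y else x) ≤ toLex y := by
      by_cases hc : y.1 < x.1 ∨ (y.1 ≤ x.1 ∧ y.2 < x.2)
      · rw [if_pos hc]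
      · rw [if_neg hc, lex_le_iff]; omega
    have hzor : (if y.1 < x.1 ∨ (y.1 ≤ x.1 ∧ y.2 < x.2) then y else x) = y ∨
        (if y.1 < x.1 ∨ (y.1 ≤ x.1 ∧ y.2 < x.2) then y else x) = x := by
      split <;> simp
    refine ⟨?_, ?_⟩
    · rcases List.mem_cons.mp hmem with h1 | h1
      · rcases hzor with h2 | h2 <;> simp [h1, h2]
      · simp [h1]
    · intro y' hy'
      have hrz : toLex r ≤ toLex (if y.1 < x.1 ∨ (y.1 ≤ x.1 ∧ y.2 < x.2) then y else x) :=
        hmin _ (by simp)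
      rcases List.mem_cons.mp hy' with h1 | h1
      · exact h1 ▸ le_trans hrz hzx
      · rcases List.mem_cons.mp h1 with h2 | h2
        · exact h2 ▸ le_trans hrz hzy
        · exact hmin y' (by simp [h2])

-- the head of the sorted heap is the minimum value of any permutation of it
theorem min2_of_inv (h : Int × Int) (t L : List (Int × Int)) (hinv : PInv (h :: t) L) :
    PySem.List.min2? L Prod.fst Prod.snd = some h := by
  obtain ⟨hsort, hperm⟩ := hinv
  obtain ⟨x, xs, hL⟩ : ∃ x xs, L = x :: xs := by
    cases hLc : L with
    | nil => exact absurd ((hLc ▸ hperm).eq_nil) (by simp)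
    | cons x xs => exact ⟨x, xs, rfl⟩
  subst hL
  obtain ⟨r, hm⟩ := min2_cons_isSome xs x
  obtain ⟨hmem, hmin⟩ := min2_spec xs x r hm
  have hrh : toLex r ≤ toLex h := hmin h (hperm.mem_iff.mp (by simp))
  have hhr : toLex h ≤ toLex r := by
    rcases List.mem_cons.mp (hperm.mem_iff.mpr hmem) with h1 | h1
    · exact le_of_eq (by rw [h1])
    · exact List.rel_of_pairwise_cons hsort h1
  have : r = h := toLex.injective (le_antisymm hrh hhr)
  rw [hm, this]

-- the two inner while loops agree and preserve the invariant
theorem while_eq (S : List (Int × Int)) : ∀ L cur tol, PInv S L →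
    ∃ L', whileB L cur tol = (L', (whileA S cur tol).2.1, (whileA S cur tol).2.2) ∧
      PInv (whileA S cur tol).1 L' := by
  induction S with
  | nil =>
    intro L cur tol hinv
    have hL : L = [] := hinv.2.symm.eq_nil
    subst hL
    refine ⟨[], ?_, ?_⟩
    · rw [whileB]; simp [min2_nil, whileA]
    · simp [whileA, PInv]
  | cons h t ih =>
    intro L cur tol hinv
    obtain ⟨ha, hb⟩ := h
    have hmin : PySem.List.min2? L Prod.fst Prod.snd = some (ha, hb) :=
      min2_of_inv (ha, hb) t L hinv
    by_cases hc : hb ≤ cur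
    · have hmem : (ha, hb) ∈ L := hinv.2.mem_iff.mp (by simp)
      have hrem : PySem.List.remove? L (ha, hb) = some (L.erase (ha, hb)) :=
        PySem.List.remove?_eq_some_erase L (ha, hb) hmem
      have hinv' : PInv t (L.erase (ha, hb)) := by
        refine ⟨hinv.1.of_cons, ?_⟩
        have := hinv.2.erase (a := (ha, hb))
        simpa using this
      obtain ⟨L', hB, hI⟩ := ih (L.erase (ha, hb)) (cur + ha) (tol + (cur + ha - hb)) hinv'
      refine ⟨L', ?_, ?_⟩
      · rw [whileB]
        simp only [hmin, if_pos hc]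
        split
        · rename_i hnone
          rw [hrem] at hnone
          simp at hnone
        · rename_i L'' heq
          rw [hrem] at heq
          injection heq with heq'
          subst heq'
          rw [hB]
          simp [whileA, hc]
      · simpa [whileA, hc] using hI
    · refine ⟨L, ?_, ?_⟩
      · rw [whileB]
        simp [hmin, hc, whileA]
      · simpa [whileA, hc] using hinv

-- the two final drains agree
theorem drain_eq (S : List (Int × Int)) : ∀ L cur tol, PInv S L →
    drainB L cur tol = drainA S cur tol := by
  induction S with
  | nil =>
    intro L cur tol hinv
    have hL : L = [] := hinv.2.symm.eq_nil
    subst hL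
    rw [drainB]; simp [min2_nil, drainA]
  | cons h t ih =>
    intro L cur tol hinv
    obtain ⟨ha, hb⟩ := h
    have hmin : PySem.List.min2? L Prod.fst Prod.snd = some (ha, hb) :=
      min2_of_inv (ha, hb) t L hinv
    have hmem : (ha, hb) ∈ L := hinv.2.mem_iff.mp (by simp)
    have hrem : PySem.List.remove? L (ha, hb) = some (L.erase (ha, hb)) :=
      PySem.List.remove?_eq_some_erase L (ha, hb) hmem
    have hinv' : PInv t (L.erase (ha, hb)) := by
      refine ⟨hinv.1.of_cons, ?_⟩
      have := hinv.2.erase (a := (ha, hb))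
      simpa using this
    rw [drainB]
    simp only [hmin]
    split
    · rename_i hnone
      rw [hrem] at hnone
      simp at hnone
    · rename_i L'' heq
      rw [hrem] at heq
      injection heq with heq'
      subst heq'
      rw [ih (L.erase (ha, hb)) (cur + ha) (tol + (cur + ha - hb)) hinv']
      simp [drainA]

-- heappush keeps the heap sorted and, as a multiset, is a cons
theorem insertBy_perm (x : Int × Int) (ys : List (Int × Int)) :
    (PySem.List.insertBy tupLt x ys).Perm (x :: ys) := by
  induction ys with
  | nil => simp [PySem.List.insertBy]
  | cons y t ih =>
    by_cases hc : tupLt x y = true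
    · simp [PySem.List.insertBy, hc]
    · simp only [PySem.List.insertBy, hc]
      simp only [Bool.false_eq_true, if_false]
      exact (ih.cons y).trans (List.Perm.swap x y t)

theorem insertBy_sorted (x : Int × Int) (ys : List (Int × Int))
    (h : ys.Pairwise (fun a b => toLex a ≤ toLex b)) :
    (PySem.List.insertBy tupLt x ys).Pairwise (fun a b => toLex a ≤ toLex b) := by
  induction ys with
  | nil => simp [PySem.List.insertBy]
  | cons y t ih =>
    by_cases hc : tupLt x y = true
    · simp only [PySem.List.insertBy, hc, if_true]
      have hxy : toLex x < toLex y := (tupLt_iff x y).mp hc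
      refine List.Pairwise.cons ?_ h
      intro b hb
      rcases List.mem_cons.mp hb with h1 | h1
      · exact le_of_lt (h1 ▸ hxy)
      · exact le_of_lt (lt_of_lt_of_le hxy (List.rel_of_pairwise_cons h h1))
    · simp only [PySem.List.insertBy, hc]
      simp only [Bool.false_eq_true, if_false]
      have hyx : toLex y ≤ toLex x := by
        rw [← not_lt]
        intro hlt
        exact hc ((tupLt_iff x y).mpr hlt)
      refine List.Pairwise.cons ?_ (ih h.of_cons)
      intro b hb
      rcases (PySem.List.mem_insertBy _ _ _ _).mp hb with h1 | h1
      · exact h1 ▸ hyx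
      · exact List.rel_of_pairwise_cons h h1

-- the outer for-loops agree and preserve the invariant
theorem fold_eq (ts : List (Int × Int)) : ∀ S L cur tol, PInv S L →
    ∃ L',
      ts.foldl
        (fun (st : List (Int × Int) × Int × Int) (p : Int × Int) =>
          let cur := if st.2.1 < p.1 then p.1 else st.2.1
          whileB (st.1 ++ [(p.2, p.1)]) cur st.2.2) (L, cur, tol)
      = (L',
         (ts.foldl
           (fun (st : List (Int × Int) × Int × Int) (p : Int × Int) =>
             let cur := if st.2.1 < p.1 then p.1 else st.2.1
             whileA (heappush st.1 (p.2, p.1)) cur st.2.2) (S, cur, tol)).2.1,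
         (ts.foldl
           (fun (st : List (Int × Int) × Int × Int) (p : Int × Int) =>
             let cur := if st.2.1 < p.1 then p.1 else st.2.1
             whileA (heappush st.1 (p.2, p.1)) cur st.2.2) (S, cur, tol)).2.2) ∧
      PInv (ts.foldl
           (fun (st : List (Int × Int) × Int × Int) (p : Int × Int) =>
             let cur := if st.2.1 < p.1 then p.1 else st.2.1
             whileA (heappush st.1 (p.2, p.1)) cur st.2.2) (S, cur, tol)).1 L' := by
  induction ts with
  | nil => intro S L cur tol hinv; exact ⟨L, rfl, hinv⟩
  | cons p ps ih =>
    intro S L cur tol hinv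
    simp only [List.foldl]
    have hinvPush : PInv (heappush S (p.2, p.1)) (L ++ [(p.2, p.1)]) := by
      refine ⟨insertBy_sorted (p.2, p.1) S hinv.1, ?_⟩
      refine (insertBy_perm (p.2, p.1) S).trans ?_
      exact (hinv.2.cons (p.2, p.1)).trans
        (by simpa using List.perm_append_comm (l₁ := [(p.2, p.1)]) (l₂ := L))
    obtain ⟨L1, hB, hI⟩ := while_eq (heappush S (p.2, p.1))
      (L ++ [(p.2, p.1)]) (if cur < p.1 then p.1 else cur) tol hinvPush
    obtain ⟨L', hB', hI'⟩ := ih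
      (whileA (heappush S (p.2, p.1)) (if cur < p.1 then p.1 else cur) tol).1 L1
      (whileA (heappush S (p.2, p.1)) (if cur < p.1 then p.1 else cur) tol).2.1
      (whileA (heappush S (p.2, p.1)) (if cur < p.1 then p.1 else cur) tol).2.2 hI
    refine ⟨L', ?_, ?_⟩
    · rw [hB]; exact hB'
    · exact hI'

-- ===== VERDICT (by name: the statement is the Claim_ definition above) =====
theorem solve_spec : Claim_equal_solve := by
  intro n times _
  unfold Spec_solve solve solve_alt
  obtain ⟨L', hB, hI⟩ := fold_eq times [] [] 0 0 ⟨by simp, by simp⟩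
  simp only [hB]
  exact (drain_eq _ L' _ _ hI).symm
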